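-- pv_equiv track=rewrite | github.com/bernardopaulsen/games | snake/snake.py | check_outside
-- ===== SOURCE A (Python) =====
-- def check_outside(snake : list, x_size : int, y_size : int) -> bool:
--     """
--     Checks if snake gets outside the table.
--
--     Parameters
--     ----------
--     snake : list
--         Snake's positions.
--     x_size : int
--         Length of table.
--     y_size : int
--         Length of table.
--
--     Returns
--     -------
--     bool
--         True if snake gets outside table.
--     """
--     outside = False
--     for part in snake:
--         x, y = part[0], part[1]
--         if x < 0 or y < 0 or x >= x_size or y >= y_size:
--             outside = True
--             break
--     return outside
-- ===== SOURCE B (Python) =====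
-- def check_outside(snake: list, x_size: int, y_size: int) -> bool:
--     """Bounding-box formulation: compare coordinate extremes against the bounds once."""
--     if not snake:
--         return False
--     xs = [p[0] for p in snake]
--     ys = [p[1] for p in snake]
--     return min(xs) < 0 or min(ys) < 0 or max(xs) >= x_size or max(ys) >= y_size
-- ===== Notes on version B (the rewrite author's own statement) =====
-- stated objective: alternative
-- what changed: Replaces the per-segment early-exit compound-predicate scan with a bounding-box computation: collect all x and y coordinates and compare their min/max once against the bounds.
-- outside the precondition, e.g. on check_outside([[-1, -1], [5]], 3, 3): A returns True, B raises IndexError; on check_outside([[0, 0], [5]], 10, 10): A raises IndexError, B raises IndexError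
import Mathlib
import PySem

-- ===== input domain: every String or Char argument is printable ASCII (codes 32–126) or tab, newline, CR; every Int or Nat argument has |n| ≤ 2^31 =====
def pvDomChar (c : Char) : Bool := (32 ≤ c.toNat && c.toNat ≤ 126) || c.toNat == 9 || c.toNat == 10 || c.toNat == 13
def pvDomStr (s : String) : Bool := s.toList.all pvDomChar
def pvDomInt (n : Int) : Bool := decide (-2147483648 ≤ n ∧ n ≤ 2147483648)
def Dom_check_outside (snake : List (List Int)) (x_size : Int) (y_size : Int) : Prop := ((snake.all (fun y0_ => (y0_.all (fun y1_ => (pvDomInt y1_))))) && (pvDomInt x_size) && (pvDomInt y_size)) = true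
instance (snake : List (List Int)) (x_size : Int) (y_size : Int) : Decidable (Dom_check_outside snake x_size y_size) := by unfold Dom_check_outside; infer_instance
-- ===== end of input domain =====

-- B replaces A's early-exit compound-predicate scan with a bounding-box (min/max extremes) check; alternative decomposition, same cost.

-- ===== PORT A =====
-- A's for-loop with break: structural recursion; part[0]/part[1] are exact under
-- Pre_ (every part has length ≥ 2), where pyGet? is some.
def check_outside (snake : List (List Int)) (x_size : Int) (y_size : Int) : Bool :=
  match snake with
  | [] => false
  | part :: rest =>
    let x := (PySem.List.pyGet? part 0).getD 0
    let y := (PySem.List.pyGet? part 1).getD 0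
    if x < 0 || y < 0 || x ≥ x_size || y ≥ y_size then true
    else check_outside rest x_size y_size

-- ===== PORT B =====
-- Source B: guard empty, build xs/ys coordinate lists, compare min/max once against bounds.
def check_outside_alt (snake : List (List Int)) (x_size : Int) (y_size : Int) : Bool :=
  if snake = [] then false
  else
    -- xs / ys from Source B are written inline here (Lean 'let' would block the rewrites below)
    match PySem.List.min? (snake.map (fun p => (PySem.List.pyGet? p 0).getD 0)) (fun v => v),
          PySem.List.min? (snake.map (fun p => (PySem.List.pyGet? p 1).getD 0)) (fun v => v),
          PySem.List.max? (snake.map (fun p => (PySem.List.pyGet? p 0).getD 0)) (fun v => v),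
          PySem.List.max? (snake.map (fun p => (PySem.List.pyGet? p 1).getD 0)) (fun v => v) with
    | some mnx, some mny, some mxx, some mxy =>
        mnx < 0 || mny < 0 || mxx ≥ x_size || mxy ≥ y_size
    | _, _, _, _ => false   -- unreachable: snake ≠ [] makes xs, ys nonempty

-- ===== PRECONDITION & SPEC =====
-- Pre_ excludes snakes containing a segment of length < 2: there Python A raises
-- IndexError (possibly after returning True via an earlier break — B raises there,
-- since it indexes every segment before comparing).
def Pre_check_outside (snake : List (List Int)) (x_size : Int) (y_size : Int) : Prop :=
  ∀ p ∈ snake, 2 ≤ p.length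
instance (snake : List (List Int)) (x_size : Int) (y_size : Int) : Decidable (Pre_check_outside snake x_size y_size) := by unfold Pre_check_outside; infer_instance

def pvWitness_check_outside : List (List Int) × Int × Int := ([[0, 0], [1, 2]], 3, 3)

def Spec_check_outside (snake : List (List Int)) (x_size : Int) (y_size : Int) (out : Bool) : Prop := out = check_outside_alt snake x_size y_size
instance (snake : List (List Int)) (x_size : Int) (y_size : Int) (out : Bool) : Decidable (Spec_check_outside snake x_size y_size out) := by unfold Spec_check_outside; infer_instance

-- ===== CLAIM (what is proved, stated in full; the proofs are below) =====
def Claim_equal_check_outside : Prop := ∀ (snake : List (List Int)) (x_size : Int) (y_size : Int), Dom_check_outside snake x_size y_size → Pre_check_outside snake x_size y_size → Spec_check_outside snake x_size y_size (check_outside snake x_size y_size)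

-- ===== LEMMAS AND PROOFS =====

-- the per-segment predicate both sides decide
def pvBad (p : List Int) (x_size y_size : Int) : Bool :=
  let x := (PySem.List.pyGet? p 0).getD 0
  let y := (PySem.List.pyGet? p 1).getD 0
  x < 0 || y < 0 || x ≥ x_size || y ≥ y_size

theorem check_outside_eq_any (snake : List (List Int)) (x_size y_size : Int) :
    check_outside snake x_size y_size = snake.any (fun p => pvBad p x_size y_size) := by
  induction snake with
  | nil => rfl
  | cons p rest ih =>
      have hstep : check_outside (p :: rest) x_size y_size =
          (pvBad p x_size y_size || check_outside rest x_size y_size) := by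
        simp only [check_outside, pvBad]
        split_ifs with h <;> simp [h]
      rw [hstep, List.any_cons, ih]

theorem check_outside_alt_eq_any (snake : List (List Int)) (x_size y_size : Int) :
    check_outside_alt snake x_size y_size = snake.any (fun p => pvBad p x_size y_size) := by
  unfold check_outside_alt
  split_ifs with hnil
  · simp [hnil]
  · set xs := snake.map (fun p => (PySem.List.pyGet? p 0).getD 0) with hxs
    set ys := snake.map (fun p => (PySem.List.pyGet? p 1).getD 0) with hys
    have hxne : xs ≠ [] := by simp [hxs, hnil]
    have hyne : ys ≠ [] := by simp [hys, hnil]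
    obtain ⟨mnx, h1⟩ := Option.ne_none_iff_exists'.mp
      (fun h => hxne (Iff.mp (PySem.List.min?_eq_none_iff xs (fun v : Int => v)) h))
    obtain ⟨mny, h2⟩ := Option.ne_none_iff_exists'.mp
      (fun h => hyne (Iff.mp (PySem.List.min?_eq_none_iff ys (fun v : Int => v)) h))
    obtain ⟨mxx, h3⟩ := Option.ne_none_iff_exists'.mp
      (fun h => hxne (Iff.mp (PySem.List.max?_eq_none_iff xs (fun v : Int => v)) h))
    obtain ⟨mxy, h4⟩ := Option.ne_none_iff_exists'.mp
      (fun h => hyne (Iff.mp (PySem.List.max?_eq_none_iff ys (fun v : Int => v)) h))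
    rw [h1, h2, h3, h4]
    rw [Bool.eq_iff_iff]
    simp only [Bool.or_eq_true, decide_eq_true_eq, List.any_eq_true, ge_iff_le]
    constructor
    · rintro (((h|h)|h)|h)
      · obtain ⟨p, hp, hfp⟩ := List.mem_map.mp (hxs ▸ PySem.List.min?_mem h1)
        exact ⟨p, hp, by simp [pvBad]; omega⟩
      · obtain ⟨p, hp, hfp⟩ := List.mem_map.mp (hys ▸ PySem.List.min?_mem h2)
        exact ⟨p, hp, by simp [pvBad]; omega⟩
      · obtain ⟨p, hp, hfp⟩ := List.mem_map.mp (hxs ▸ PySem.List.max?_mem h3)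
        exact ⟨p, hp, by simp [pvBad]; omega⟩
      · obtain ⟨p, hp, hfp⟩ := List.mem_map.mp (hys ▸ PySem.List.max?_mem h4)
        exact ⟨p, hp, by simp [pvBad]; omega⟩
    · rintro ⟨p, hp, hb⟩
      simp only [pvBad, Bool.or_eq_true, decide_eq_true_eq, ge_iff_le] at hb
      have hx : (PySem.List.pyGet? p 0).getD 0 ∈ xs := by
        rw [hxs]; exact List.mem_map_of_mem hp
      have hy : (PySem.List.pyGet? p 1).getD 0 ∈ ys := by
        rw [hys]; exact List.mem_map_of_mem hp
      rcases hb with (((h|h)|h)|h)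
      · exact Or.inl (Or.inl (Or.inl (lt_of_le_of_lt (PySem.List.min?_isMin h1 _ hx) h)))
      · exact Or.inl (Or.inl (Or.inr (lt_of_le_of_lt (PySem.List.min?_isMin h2 _ hy) h)))
      · exact Or.inl (Or.inr (le_trans h (PySem.List.max?_isMax h3 _ hx)))
      · exact Or.inr (le_trans h (PySem.List.max?_isMax h4 _ hy))

-- ===== VERDICT (by name: the statement is the Claim_ definition above) =====
theorem check_outside_spec : Claim_equal_check_outside := by
  intro snake x_size y_size _ _
  unfold Spec_check_outside
  rw [check_outside_eq_any, check_outside_alt_eq_any]
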